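-- pv_equiv track=rewrite | github.com/huishenlab/tranquillyzer | scripts/extract_annotated_seqs.py | collapse_labels
-- ===== SOURCE A (Python) =====
-- def collapse_labels(arr, read_length):
--     read = arr[0:read_length]
--     collapsed_array = []
--     count_dict = {}
--     indices_dict = {}
--     prev = None
--     start_index = 0
--
--     for i, element in enumerate(read):
--         if element != prev:
--             if prev is not None:
--                 collapsed_array.append(prev)
--                 count_dict[prev] = count_dict.get(prev, 0) + 1
--                 indices_dict[prev] = indices_dict.get(prev, []) + [(start_index, i)]
--             prev = element
--             start_index = i
--
--     if prev is not None:
--         collapsed_array.append(prev)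
--         count_dict[prev] = count_dict.get(prev, 0) + 1
--         indices_dict[prev] = indices_dict.get(prev, []) + [(start_index, len(read))]
--
--     return collapsed_array, count_dict, indices_dict
-- ===== SOURCE B (Python) =====
-- def collapse_labels(arr, read_length):
--     read = arr[0:read_length]
--     # phase 1: split into (key, run_length) pairs
--     runs = []
--     i = 0
--     n = len(read)
--     while i < n:
--         j = i + 1
--         while j < n and read[j] == read[i]:
--             j += 1
--         runs.append((read[i], j - i))
--         i = j
--     # phase 2: emit one entry per run, tracking the running start offset
--     collapsed_array = []
--     count_dict = {}
--     indices_dict = {}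
--     start = 0
--     for key, length in runs:
--         end = start + length
--         collapsed_array.append(key)
--         count_dict[key] = count_dict.get(key, 0) + 1
--         indices_dict[key] = indices_dict.get(key, []) + [(start, end)]
--         start = end
--     return collapsed_array, count_dict, indices_dict
-- ===== Notes on version B (the rewrite author's own statement) =====
-- stated objective: alternative
-- what changed: Replaces A's single-pass prev-sentinel loop with a two-phase algorithm: first split the read into (key, run-length) pairs with a nested scan, then emit the collapsed key, count and (start, end) range per run while carrying a running start offset.
import Mathlib
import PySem

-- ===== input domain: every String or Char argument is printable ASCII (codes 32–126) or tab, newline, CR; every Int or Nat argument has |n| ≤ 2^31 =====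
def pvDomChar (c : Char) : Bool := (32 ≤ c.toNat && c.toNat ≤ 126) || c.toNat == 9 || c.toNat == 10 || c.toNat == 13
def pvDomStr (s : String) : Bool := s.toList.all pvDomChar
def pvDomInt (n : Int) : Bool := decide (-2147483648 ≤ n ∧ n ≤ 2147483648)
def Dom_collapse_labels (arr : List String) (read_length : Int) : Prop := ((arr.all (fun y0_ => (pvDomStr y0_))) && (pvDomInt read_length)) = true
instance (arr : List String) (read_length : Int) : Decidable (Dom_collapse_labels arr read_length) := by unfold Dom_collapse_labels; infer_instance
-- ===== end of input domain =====

-- B re-implements the run-length collapse in two phases (first split read into (key, run-length)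
-- pairs, then emit one entry per run with a running start offset) instead of A's one-pass
-- prev-sentinel loop; same values, objective: alternative decomposition.

-- ===== PORT A =====
-- A's loop body (one enumerated element against the state (collapsed, counts, indices, prev, start_index))
def pvStepA
    (st : List String × PySem.Dict String Int × PySem.Dict String (List (Int × Int)) × Option String × Int)
    (ie : Int × String) :
    List String × PySem.Dict String Int × PySem.Dict String (List (Int × Int)) × Option String × Int :=
  let (ca, cd, idd, prev, si) := st
  if prev ≠ some ie.2 then
    match prev with
    | some pv =>
        (ca ++ [pv], cd.insert pv (cd.getD pv 0 + 1),
         idd.insert pv (idd.getD pv [] ++ [(si, ie.1)]), some ie.2, ie.1)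
    | none => (ca, cd, idd, some ie.2, ie.1)
  else st

def collapse_labels (arr : List String) (read_length : Int) :
    List String × (List (String × Int)) × (List (String × List (Int × Int))) :=
  let read := PySem.List.slice arr (some 0) (some read_length)
  let st := (PySem.List.enumerate read).foldl pvStepA
      ([], PySem.Dict.empty, PySem.Dict.empty, none, 0)
  let (ca, cd, idd, prev, si) := st
  match prev with
  | some pv =>
      (ca ++ [pv], (cd.insert pv (cd.getD pv 0 + 1)).items,
       (idd.insert pv (idd.getD pv [] ++ [(si, (read.length : Int))])).items)
  | none => (ca, cd.items, idd.items)

-- ===== PORT B =====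
-- phase 1 of Source B: split the read into (key, run-length) pairs (the nested while scan)
def pvRuns : List String → List (String × Int)
  | [] => []
  | x :: xs =>
      (x, ((xs.takeWhile (fun y => y == x)).length : Int) + 1) ::
        pvRuns (xs.dropWhile (fun y => y == x))
termination_by l => l.length
decreasing_by
  simp only [List.length_cons]
  exact Nat.lt_succ_of_le (List.length_dropWhile_le _ _)

-- phase 2 of Source B: one entry per run, state (start, collapsed, counts, indices)
def pvStepB
    (st : Int × List String × PySem.Dict String Int × PySem.Dict String (List (Int × Int)))
    (kn : String × Int) :
    Int × List String × PySem.Dict String Int × PySem.Dict String (List (Int × Int)) :=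
  let (start, ca, cd, idd) := st
  let e := start + kn.2
  (e, ca ++ [kn.1], cd.insert kn.1 (cd.getD kn.1 0 + 1),
   idd.insert kn.1 (idd.getD kn.1 [] ++ [(start, e)]))

def collapse_labels_alt (arr : List String) (read_length : Int) :
    List String × (List (String × Int)) × (List (String × List (Int × Int))) :=
  let read := PySem.List.slice arr (some 0) (some read_length)
  let st := (pvRuns read).foldl pvStepB (0, [], PySem.Dict.empty, PySem.Dict.empty)
  (st.2.1, st.2.2.1.items, st.2.2.2.items)

-- ===== PRECONDITION & SPEC =====
def Spec_collapse_labels (arr : List String) (read_length : Int) (out : List String × (List (String × Int)) × (List (String × List (Int × Int)))) : Prop := out = collapse_labels_alt arr read_length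
instance (arr : List String) (read_length : Int) (out : List String × (List (String × Int)) × (List (String × List (Int × Int)))) : Decidable (Spec_collapse_labels arr read_length out) := by unfold Spec_collapse_labels; infer_instance

-- ===== CLAIM (what is proved, stated in full; the proofs are below) =====
def Claim_equal_collapse_labels : Prop := ∀ (arr : List String) (read_length : Int), Dom_collapse_labels arr read_length → Spec_collapse_labels arr read_length (collapse_labels arr read_length)

-- ===== LEMMAS AND PROOFS =====

-- the common flush: one (key, start, end) entry appended to (collapsed, counts, indices)
def pvFlush (acc : List String × PySem.Dict String Int × PySem.Dict String (List (Int × Int)))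
    (k : String) (a b : Int) :
    List String × PySem.Dict String Int × PySem.Dict String (List (Int × Int)) :=
  (acc.1 ++ [k], acc.2.1.insert k (acc.2.1.getD k 0 + 1),
   acc.2.2.insert k (acc.2.2.getD k [] ++ [(a, b)]))

-- A's final "if prev is not None" flush, with len(read) as last argument
def pvFinal
    (st : List String × PySem.Dict String Int × PySem.Dict String (List (Int × Int)) × Option String × Int)
    (len : Int) :
    List String × PySem.Dict String Int × PySem.Dict String (List (Int × Int)) :=
  let (ca, cd, idd, prev, si) := st
  match prev with
  | some pv => pvFlush (ca, cd, idd) pv si len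
  | none => (ca, cd, idd)

-- elements equal to prev are skipped by A's loop
lemma pvSkipA (t rest : List String) (k : String) (h : ∀ y ∈ t, y = k) (s : Int)
    (acc : List String × PySem.Dict String Int × PySem.Dict String (List (Int × Int))) (s0 : Int) :
    (PySem.List.enumerate (t ++ rest) s).foldl pvStepA (acc.1, acc.2.1, acc.2.2, some k, s0)
      = (PySem.List.enumerate rest (s + t.length)).foldl pvStepA (acc.1, acc.2.1, acc.2.2, some k, s0) := by
  induction t generalizing s with
  | nil => simp
  | cons y ys ih =>
      have hy : y = k := h y (by simp)
      simp only [List.cons_append, PySem.List.enumerate_cons, List.foldl_cons]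
      have hstep : pvStepA (acc.1, acc.2.1, acc.2.2, some k, s0) (s, y)
          = (acc.1, acc.2.1, acc.2.2, some k, s0) := by
        simp [pvStepA, hy]
      rw [hstep, ih (fun z hz => h z (by simp [hz]))]
      congr 2
      simp only [List.length_cons]
      push_cast
      ring

-- main loop correspondence: A's loop from state (prev = some k, start_index = s0), about to
-- read index s0+1, matches B's run fold after flushing k's current run
lemma pvMain (n : Nat) : ∀ (l : List String), l.length ≤ n → ∀ (k : String) (s0 : Int)
    (acc : List String × PySem.Dict String Int × PySem.Dict String (List (Int × Int))),
    pvFinal ((PySem.List.enumerate l (s0 + 1)).foldl pvStepA (acc.1, acc.2.1, acc.2.2, some k, s0))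
        (s0 + 1 + (l.length : Int))
      = ((pvRuns (l.dropWhile (fun y => y == k))).foldl pvStepB
          (s0 + 1 + ((l.takeWhile (fun y => y == k)).length : Int),
           pvFlush acc k s0 (s0 + 1 + ((l.takeWhile (fun y => y == k)).length : Int)))).2 := by
  induction n with
  | zero =>
      intro l hl k s0 acc
      have hnil : l = [] := List.eq_nil_of_length_eq_zero (Nat.le_zero.mp hl)
      subst hnil
      simp [pvFinal, pvFlush, pvRuns]
  | succ n ih =>
      intro l hl k s0 acc
      have hsplit := List.takeWhile_append_dropWhile (p := fun y => y == k) (l := l)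
      set t := l.takeWhile (fun y => y == k) with ht
      set rest := l.dropWhile (fun y => y == k) with hrest
      have hall : ∀ y ∈ t, y = k := by
        intro y hy
        have := List.mem_takeWhile_imp (ht ▸ hy)
        exact eq_of_beq this
      have hl' : l.length = t.length + rest.length := by
        rw [← hsplit]; simp
      rw [← hsplit, pvSkipA t rest k hall (s0 + 1) acc s0]
      cases hr : rest with
      | nil =>
          simp [pvFinal, pvRuns, pvFlush]
      | cons x xs =>
          have hx : (x == k) = false := by
            have := List.head?_dropWhile_not (p := fun y => y == k) (l := l)
            rw [← hrest, hr] at this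
            simpa using this
          have hxs : xs.length ≤ n := by
            have : l.length = t.length + (xs.length + 1) := by rw [hl', hr]; simp
            omega
          simp only [PySem.List.enumerate_cons, List.foldl_cons]
          have hstep : pvStepA (acc.1, acc.2.1, acc.2.2, some k, s0) (s0 + 1 + (t.length : Int), x)
              = ((pvFlush acc k s0 (s0 + 1 + (t.length : Int))).1,
                 (pvFlush acc k s0 (s0 + 1 + (t.length : Int))).2.1,
                 (pvFlush acc k s0 (s0 + 1 + (t.length : Int))).2.2,
                 some x, s0 + 1 + (t.length : Int)) := by
            have : some k ≠ some x := by
              intro hcon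
              rw [show k = x from (Option.some.inj hcon)] at hx
              simp at hx
            simp [pvStepA, this, pvFlush]
          rw [hstep]
          have key := ih xs hxs x (s0 + 1 + (t.length : Int)) (pvFlush acc k s0 (s0 + 1 + (t.length : Int)))
          simp only [pvRuns, List.foldl_cons, pvStepB]
          rw [show s0 + 1 + (((t ++ x :: xs).length : Int)) = s0 + 1 + (t.length : Int) + 1 + (xs.length : Int) from by
            push_cast [List.length_append, List.length_cons]; ring]
          rw [show s0 + 1 + (t.length : Int) + (((List.takeWhile (fun y => y == x) xs).length : Int) + 1)
                = s0 + 1 + (t.length : Int) + 1 + ((List.takeWhile (fun y => y == x) xs).length : Int) from by ring]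
          simp only [pvFlush] at key
          exact key

-- ===== VERDICT (by name: the statement is the Claim_ definition above) =====
theorem collapse_labels_spec : Claim_equal_collapse_labels := by
  intro arr read_length _
  unfold Spec_collapse_labels collapse_labels collapse_labels_alt
  set read := PySem.List.slice arr (some 0) (some read_length) with hread
  cases hr : read with
  | nil => simp [pvRuns]
  | cons x xs =>
      simp only [PySem.List.enumerate, List.foldl_cons]
      have hstep : pvStepA (([] : List String), PySem.Dict.empty, PySem.Dict.empty, none, 0) (0, x)
          = ([], PySem.Dict.empty, PySem.Dict.empty, some x, 0) := by
        simp [pvStepA]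
      rw [hstep]
      have key := pvMain xs.length xs le_rfl x 0 ([], PySem.Dict.empty, PySem.Dict.empty)
      simp only [pvFlush, List.nil_append] at key
      rw [show ((x :: xs).length : Int) = 0 + 1 + (xs.length : Int) from by
        push_cast [List.length_cons]; ring]
      simp only [pvRuns, List.foldl_cons, pvStepB, List.nil_append]
      rw [show (0 : Int) + (((List.takeWhile (fun y => y == x) xs).length : Int) + 1)
            = 0 + 1 + ((List.takeWhile (fun y => y == x) xs).length : Int) from by ring]
      generalize hst : List.foldl pvStepA (([] : List String), PySem.Dict.empty, PySem.Dict.empty,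
          some x, (0 : Int)) (PySem.List.enumerate xs (0 + 1)) = st at key ⊢
      obtain ⟨ca, cd, idd, prev, si⟩ := st
      simp only [pvFinal] at key
      cases prev <;> (rw [← key]; try simp [pvFlush])
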